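-- pv_equiv track=rewrite | github.com/zhouhang/financial-ai | finance-agent/security_utils.py | validate_filename
-- ===== SOURCE A (Python) =====
-- def validate_filename(filename: str) -> bool:
--     """
--     验证文件名格式，防止路径遍历攻击
--
--     Args:
--         filename: 文件名
--
--     Returns:
--         是否有效
--     """
--     if not filename:
--         return False
--
--     # 长度限制
--     if len(filename) > 255:
--         return False
--
--     # 不允许包含路径分隔符
--     if '/' in filename or '\\' in filename or '..' in filename:
--         return False
--
--     # 不允许包含特殊字符
--     dangerous_chars = ['<', '>', ':', '"', '|', '?', '*', '\0']
--     if any(char in filename for char in dangerous_chars):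
--         return False
--
--     return True
-- ===== SOURCE B (Python) =====
-- _FORBIDDEN = {'/', '\\', '<', '>', ':', '"', '|', '?', '*', '\0'}
--
--
-- def validate_filename(filename: str) -> bool:
--     if not filename:
--         return False
--     if len(filename) > 255:
--         return False
--     prev = None
--     for ch in filename:
--         if ch in _FORBIDDEN:
--             return False
--         if prev == '.' and ch == '.':
--             return False
--         prev = ch
--     return True
-- ===== Notes on version B (the rewrite author's own statement) =====
-- stated objective: alternative
-- what changed: Replaces A's several independent scans (two separator membership tests, a double-dot substring test, and an any() over eight dangerous characters) with a single left-to-right pass that keeps the previous character, rejecting on a forbidden-set hit or on two adjacent dots.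
import Mathlib
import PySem

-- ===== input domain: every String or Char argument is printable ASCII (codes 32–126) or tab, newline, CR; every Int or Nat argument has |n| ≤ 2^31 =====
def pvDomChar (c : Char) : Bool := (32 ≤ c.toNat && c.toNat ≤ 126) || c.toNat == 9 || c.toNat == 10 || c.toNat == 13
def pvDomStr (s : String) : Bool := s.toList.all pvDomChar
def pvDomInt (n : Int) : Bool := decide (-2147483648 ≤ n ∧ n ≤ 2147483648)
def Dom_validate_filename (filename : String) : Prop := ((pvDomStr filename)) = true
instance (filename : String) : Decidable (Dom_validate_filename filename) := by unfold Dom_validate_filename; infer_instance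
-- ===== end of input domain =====

-- B replaces A's several independent substring/membership scans with one pass keeping the previous character (alternative decomposition, same behaviour).

-- ===== PORT A =====
def validate_filename (filename : String) : Bool :=
  if filename.toList = [] then false
  else if 255 < PySem.Str.len filename then false
  else if PySem.Str.isIn "/" filename || PySem.Str.isIn "\\" filename || PySem.Str.isIn ".." filename then false
  else if (["<", ">", ":", "\"", "|", "?", "*", "\x00"] : List String).any (fun ch => PySem.Str.isIn ch filename) then false
  else true

-- ===== PORT B =====
def pvForbidden : List Char := ['/', '\\', '<', '>', ':', '"', '|', '?', '*', '\x00']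

def pvScan : List Char → Option Char → Bool
  | [], _ => true
  | c :: rest, prev =>
      if pvForbidden.contains c then false
      else if prev == some '.' && c == '.' then false
      else pvScan rest (some c)

def validate_filename_alt (filename : String) : Bool :=
  if filename.toList = [] then false
  else if 255 < PySem.Str.len filename then false
  else pvScan filename.toList none

-- ===== PRECONDITION & SPEC =====
def Spec_validate_filename (filename : String) (out : Bool) : Prop := out = validate_filename_alt filename
instance (filename : String) (out : Bool) : Decidable (Spec_validate_filename filename out) := by unfold Spec_validate_filename; infer_instance

-- ===== CLAIM (what is proved, stated in full; the proofs are below) =====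
def Claim_equal_validate_filename : Prop := ∀ (filename : String), Dom_validate_filename filename → Spec_validate_filename filename (validate_filename filename)

-- ===== LEMMAS AND PROOFS =====

/-- adjacent-double-dot detector that pvScan tracks, forbidden chars ignored -/
def pvHasDD : Option Char → List Char → Bool
  | _, [] => false
  | prev, c :: rest => (prev == some '.' && c == '.') || pvHasDD (some c) rest

theorem pvScan_eq (cs : List Char) (prev : Option Char) :
    pvScan cs prev = (cs.all (fun c => !pvForbidden.contains c) && !pvHasDD prev cs) := by
  induction cs generalizing prev with
  | nil => rfl
  | cons c rest ih =>
    show (if pvForbidden.contains c then false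
      else if prev == some '.' && c == '.' then false
      else pvScan rest (some c)) = _
    by_cases hf : c ∈ pvForbidden
    · simp [pvHasDD, hf]
    · cases hd : (prev == some '.' && c == '.') with
      | true => simp [pvHasDD, hf, hd]
      | false => simp [pvHasDD, hf, hd, ih]

theorem pvHasDD_none_iff (cs : List Char) :
    pvHasDD none cs = true ↔ ['.', '.'] <:+: cs := by
  induction cs with
  | nil => simp [pvHasDD]
  | cons c rest ih =>
    cases rest with
    | nil => simp [pvHasDD, List.infix_cons_iff, List.cons_prefix_cons]
    | cons d rest' =>
      have h2 : pvHasDD none (c :: d :: rest') =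
          ((c == '.' && d == '.') || pvHasDD none (d :: rest')) := by
        simp [pvHasDD]
      rw [h2]
      simp only [Bool.or_eq_true, Bool.and_eq_true, beq_iff_eq, ih,
        List.infix_cons_iff, List.cons_prefix_cons, List.nil_prefix, and_true]
      aesop

theorem pv_singleton_infix {a : Char} {l : List Char} : [a] <:+: l ↔ a ∈ l := by
  constructor
  · intro h; exact h.mem (by simp)
  · intro h
    rcases List.append_of_mem h with ⟨s, t, rfl⟩
    exact ⟨s, t, by simp⟩

theorem pv_core (filename : String) :
    ((if PySem.Str.isIn "/" filename || PySem.Str.isIn "\\" filename || PySem.Str.isIn ".." filename then false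
      else if (["<", ">", ":", "\"", "|", "?", "*", "\x00"] : List String).any (fun ch => PySem.Str.isIn ch filename) then false
      else true)
    = (filename.toList.all (fun c => !pvForbidden.contains c) && !pvHasDD none filename.toList)) := by
  have hDD' : ∀ cs, pvHasDD none cs = false ↔ ¬ ['.', '.'] <:+: cs := by
    intro cs; rw [← pvHasDD_none_iff]; simp
  rw [Bool.eq_iff_iff]
  simp only [PySem.Str.isIn_eq, Bool.ite_eq_true_distrib, Bool.and_eq_true, Bool.or_eq_true,
    Bool.not_eq_true', List.any_eq_true, List.all_eq_true,
    show ("/" : String).toList = ['/'] from rfl, show ("\\" : String).toList = ['\\'] from rfl,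
    show (".." : String).toList = ['.', '.'] from rfl]
  simp only [List.mem_cons, List.not_mem_nil, or_false, exists_eq_or_imp, exists_eq_left,
    show ("<" : String).toList = ['<'] from rfl, show (">" : String).toList = ['>'] from rfl,
    show (":" : String).toList = [':'] from rfl, show ("\"" : String).toList = ['"'] from rfl,
    show ("|" : String).toList = ['|'] from rfl, show ("?" : String).toList = ['?'] from rfl,
    show ("*" : String).toList = ['*'] from rfl, show ("\x00" : String).toList = ['\x00'] from rfl]
  simp only [PySem.Chars.isIn_iff_infix, pv_singleton_infix, hDD', pvForbidden,
    List.contains_eq_mem, List.mem_cons, List.not_mem_nil, or_false, decide_eq_false_iff_not]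
  split_ifs with h1 h2
  · constructor
    · intro h; exact h.elim
    · rintro ⟨hall, hdd⟩
      rcases h1 with (h | h) | h
      · exact (hall _ h (Or.inl rfl)).elim
      · exact (hall _ h (Or.inr (Or.inl rfl))).elim
      · exact (hdd h).elim
  · constructor
    · intro h; exact h.elim
    · rintro ⟨hall, -⟩
      rcases h2 with h | h | h | h | h | h | h | h <;>
        exact (hall _ h (by simp)).elim
  · push_neg at h1 h2
    obtain ⟨⟨hs, hbs⟩, hdd⟩ := h1
    obtain ⟨h3, h4, h5, h6, h7, h8, h9, h10⟩ := h2
    constructor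
    · intro _
      refine ⟨fun x hx => ?_, hdd⟩
      rintro (rfl | rfl | rfl | rfl | rfl | rfl | rfl | rfl | rfl | rfl) <;>
        first
          | exact hs hx | exact hbs hx | exact h3 hx | exact h4 hx | exact h5 hx
          | exact h6 hx | exact h7 hx | exact h8 hx | exact h9 hx | exact h10 hx
    · intro _; trivial

theorem validate_filename_spec : Claim_equal_validate_filename := by
  intro filename _
  unfold Spec_validate_filename validate_filename validate_filename_alt
  by_cases h0 : filename.toList = []
  · rw [if_pos h0, if_pos h0]
  · rw [if_neg h0, if_neg h0]
    by_cases hlen : 255 < PySem.Str.len filename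
    · rw [if_pos hlen, if_pos hlen]
    · rw [if_neg hlen, if_neg hlen]
      rw [pvScan_eq]
      exact pv_core filename
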